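-- pv_equiv track=rewrite | github.com/FreeCadelca/Steganography_PVD | main.py | get_d_l_u_n
-- ===== SOURCE A (Python) =====
-- list_of_intervals = ((0, 7), (8, 15), (16, 31), (32, 63), (64, 127), (128, 255))
--
-- def get_d_l_u_n(v1: int, v2: int) -> tuple:
--     d_k = abs(v1 - v2)
--     l_k = None
--     u_k = None
--     for interval in list_of_intervals:
--         if interval[0] <= d_k <= interval[1]:
--             l_k = interval[0]
--             u_k = interval[1]
--             break
--     n_k = (u_k - l_k + 1).bit_length() - 1
--     return d_k, l_k, u_k, n_k
-- ===== SOURCE B (Python) =====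
-- def get_d_l_u_n(v1: int, v2: int) -> tuple:
--     d_k = abs(v1 - v2)
--     b = d_k.bit_length()
--     if b <= 3:
--         l_k, u_k = 0, 7
--     else:
--         l_k, u_k = 1 << (b - 1), (1 << b) - 1
--     return d_k, l_k, u_k, max(b - 1, 3)
-- ===== Notes on version B (the rewrite author's own statement) =====
-- stated objective: simpler
-- what changed: replaced the linear scan of the interval table by computing the bit length of the pixel difference and deriving (l_k, u_k, n_k) arithmetically from it
-- crash fix: when |v1 - v2| > 255 A raises TypeError (no interval matches, so l_k and u_k stay None); B returns the natural extension (d_k, 1 << (b-1), (1 << b) - 1, b-1) of the power-of-two interval table, e.g. (300, 256, 511, 8). — e.g. on get_d_l_u_n(0, 300): A raises TypeError, B returns (300, 256, 511, 8)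
import Mathlib
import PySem

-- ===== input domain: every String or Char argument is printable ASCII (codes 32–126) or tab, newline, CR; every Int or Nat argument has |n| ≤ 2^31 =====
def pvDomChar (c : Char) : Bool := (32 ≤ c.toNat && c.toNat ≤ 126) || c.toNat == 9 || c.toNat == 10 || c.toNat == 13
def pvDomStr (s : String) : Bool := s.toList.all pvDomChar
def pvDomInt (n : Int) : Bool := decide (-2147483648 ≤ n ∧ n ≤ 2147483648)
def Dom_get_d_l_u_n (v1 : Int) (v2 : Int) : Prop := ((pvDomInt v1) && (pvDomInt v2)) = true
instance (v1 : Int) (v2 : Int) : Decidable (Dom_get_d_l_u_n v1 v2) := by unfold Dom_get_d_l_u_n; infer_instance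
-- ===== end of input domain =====

-- B replaces A's scan of the 6-entry interval table by bit-length arithmetic on the
-- pixel difference (objective: simpler). Equal on Pre_ (|v1 - v2| ≤ 255, where A returns).

-- ===== PORT A =====

-- Python's int.bit_length(): exact, since Python takes abs first and Nat.size n = bits of n.
def pvBitLength (n : Int) : Int := (Nat.size n.natAbs : Int)

def pvIntervals : List (Int × Int) := [(0, 7), (8, 15), (16, 31), (32, 63), (64, 127), (128, 255)]

-- the for-loop with break: first interval containing d, as the (l_k, u_k) accumulators
def pvALoop : List (Int × Int) → Int → Option Int × Option Int
  | [], _ => (none, none)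
  | (a, b) :: rest, d => if a ≤ d ∧ d ≤ b then (some a, some b) else pvALoop rest d

def get_d_l_u_n (v1 : Int) (v2 : Int) : Int × Int × Int × Int :=
  let d_k := |v1 - v2|
  match pvALoop pvIntervals d_k with
  | (some l_k, some u_k) => (d_k, l_k, u_k, pvBitLength (u_k - l_k + 1) - 1)
  | _ => (d_k, 0, 0, 0)  -- Python raises TypeError here (None - None); excluded by Pre_

-- ===== PORT B =====
def get_d_l_u_n_alt (v1 : Int) (v2 : Int) : Int × Int × Int × Int :=
  let d_k := |v1 - v2|
  let b := pvBitLength d_k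
  if b ≤ 3 then (d_k, 0, 7, 3)
  else (d_k, (2 : Int) ^ (b - 1).toNat, (2 : Int) ^ b.toNat - 1, max (b - 1) 3)

-- ===== PRECONDITION & SPEC =====
-- Pre_: exactly the inputs where A finds an interval and returns; for |v1 - v2| > 255 A raises TypeError.
def Pre_get_d_l_u_n (v1 : Int) (v2 : Int) : Prop := |v1 - v2| ≤ 255
instance (v1 : Int) (v2 : Int) : Decidable (Pre_get_d_l_u_n v1 v2) := by unfold Pre_get_d_l_u_n; infer_instance
def pvWitness_get_d_l_u_n : Int × Int := (10, 3)

-- when |v1 - v2| > 255 A raises TypeError; B returns the natural power-of-two extension of the table.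
def Raises_get_d_l_u_n (v1 : Int) (v2 : Int) : Prop := 255 < |v1 - v2|
instance (v1 : Int) (v2 : Int) : Decidable (Raises_get_d_l_u_n v1 v2) := by unfold Raises_get_d_l_u_n; infer_instance
def pvRaiseWitness_get_d_l_u_n : Int × Int := (0, 300)
def pvRaiseWitnessOut_get_d_l_u_n : Int × Int × Int × Int := (300, 256, 511, 8)

def Spec_get_d_l_u_n (v1 : Int) (v2 : Int) (out : Int × Int × Int × Int) : Prop := out = get_d_l_u_n_alt v1 v2
instance (v1 : Int) (v2 : Int) (out : Int × Int × Int × Int) : Decidable (Spec_get_d_l_u_n v1 v2 out) := by unfold Spec_get_d_l_u_n; infer_instance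

-- ===== CLAIM (what is proved, stated in full; the proofs are below) =====
def Claim_equal_get_d_l_u_n : Prop := ∀ (v1 : Int) (v2 : Int), Dom_get_d_l_u_n v1 v2 → Pre_get_d_l_u_n v1 v2 → Spec_get_d_l_u_n v1 v2 (get_d_l_u_n v1 v2)
def Claim_raises_get_d_l_u_n : Prop := (∀ (v1 : Int) (v2 : Int), Dom_get_d_l_u_n v1 v2 → Raises_get_d_l_u_n v1 v2 → ¬ Pre_get_d_l_u_n v1 v2) ∧ (Dom_get_d_l_u_n (pvRaiseWitness_get_d_l_u_n.1) (pvRaiseWitness_get_d_l_u_n.2) ∧ Raises_get_d_l_u_n (pvRaiseWitness_get_d_l_u_n.1) (pvRaiseWitness_get_d_l_u_n.2) ∧ get_d_l_u_n_alt (pvRaiseWitness_get_d_l_u_n.1) (pvRaiseWitness_get_d_l_u_n.2) = pvRaiseWitnessOut_get_d_l_u_n)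

-- ===== LEMMAS AND PROOFS =====

-- core computations as a function of d alone
def pvACore (d : Int) : Int × Int × Int × Int :=
  match pvALoop pvIntervals d with
  | (some l, some u) => (d, l, u, pvBitLength (u - l + 1) - 1)
  | _ => (d, 0, 0, 0)

def pvBCore (d : Int) : Int × Int × Int × Int :=
  let b := pvBitLength d
  if b ≤ 3 then (d, 0, 7, 3)
  else (d, (2 : Int) ^ (b - 1).toNat, (2 : Int) ^ b.toNat - 1, max (b - 1) 3)

lemma pvA_eq_core (v1 v2 : Int) : get_d_l_u_n v1 v2 = pvACore |v1 - v2| := rfl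
lemma pvB_eq_core (v1 v2 : Int) : get_d_l_u_n_alt v1 v2 = pvBCore |v1 - v2| := rfl

set_option maxRecDepth 4000 in
lemma pvCore_eq_fin : ∀ n : Fin 256, pvACore (n.val : Int) = pvBCore (n.val : Int) := by decide

lemma pvCore_eq (d : Int) (h0 : 0 ≤ d) (h1 : d ≤ 255) : pvACore d = pvBCore d := by
  lift d to ℕ using h0 with n
  have hn : n < 256 := by omega
  exact pvCore_eq_fin ⟨n, hn⟩

-- ===== VERDICT (by name: the statement is the Claim_ definition above) =====
theorem get_d_l_u_n_spec : Claim_equal_get_d_l_u_n := by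
  intro v1 v2 _ hpre
  unfold Spec_get_d_l_u_n
  rw [pvA_eq_core, pvB_eq_core]
  exact pvCore_eq _ (abs_nonneg _) hpre

theorem get_d_l_u_n_raises : Claim_raises_get_d_l_u_n := by
  unfold Claim_raises_get_d_l_u_n
  exact ⟨fun v1 v2 _ hr => by unfold Pre_get_d_l_u_n; unfold Raises_get_d_l_u_n at hr; omega, by decide⟩

-- self-check: the raise witness indeed lies outside Pre_ (a use of get_d_l_u_n_raises)
theorem pvRaiseWitness_ok : ¬ Pre_get_d_l_u_n pvRaiseWitness_get_d_l_u_n.1 pvRaiseWitness_get_d_l_u_n.2 :=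
  get_d_l_u_n_raises.1 _ _ (by decide) get_d_l_u_n_raises.2.2.1
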